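-- pv_equiv track=rewrite | github.com/pssnyder/BlackjackAI | simple_strategy_blackjackai/play_blackjack.py | get_strategy_action
-- ===== SOURCE A (Python) =====
-- def calculate_hand_value(hand):
--     """
--     Calculates the total value of a hand, considering the special case of Aces.
--
--     Parameters:
--     hand (list): A list of tuples representing the hand of cards.
--
--     Returns:
--     int: The total value of the hand.
--     """
--     value = 0
--     ace_count = 0
--     for card, suit in hand:
--         if card in ['Jack', 'Queen', 'King']:
--             value += 10
--         elif card == 'Ace':
--             ace_count += 1
--             value += 11
--         else:
--             value += int(card)
--
--     # Adjust for Aces if value is over 21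
--     while value > 21 and ace_count:
--         value -= 10
--         ace_count -= 1
--
--     return value
--
-- def get_strategy_action(player_hand, dealer_upcard):
--     """
--     Determines the action to take based on the strategy chart.
--
--     Parameters:
--     player_hand (list): The player's hand.
--     dealer_upcard (tuple): The dealer's upcard.
--
--     Returns:
--     str: The action to take ('H', 'S', 'D', 'Y', 'SUR').
--     """
--     player_value = calculate_hand_value(player_hand)
--     dealer_value = calculate_hand_value([dealer_upcard])
--
--     # Determine if the player has a pair
--     if len(player_hand) == 2 and player_hand[0][0] == player_hand[1][0]:
--         pair = player_hand[0][0]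
--         if pair == 'Ace':
--             return 'Y'
--         elif pair == '10':
--             return 'N'
--         elif pair == '9':
--             return 'Y' if dealer_value in [2, 3, 4, 5, 6, 8, 9] else 'N'
--         elif pair == '8':
--             return 'Y'
--         elif pair == '7':
--             return 'Y' if dealer_value in [2, 3, 4, 5, 6, 7] else 'H'
--         elif pair == '6':
--             return 'Y' if dealer_value in [2, 3, 4, 5, 6] else 'H'
--         elif pair == '5':
--             return 'D' if dealer_value in [2, 3, 4, 5, 6, 7, 8, 9] else 'H'
--         elif pair == '4':
--             return 'Y' if dealer_value in [5, 6] else 'H'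
--         elif pair == '3' or pair == '2':
--             return 'Y' if dealer_value in [2, 3, 4, 5, 6, 7] else 'H'
--
--     # Determine if the player has a soft total
--     if any(card == 'Ace' for card, suit in player_hand):
--         if player_value == 20:
--             return 'S'
--         elif player_value == 19:
--             return 'D' if dealer_value == 6 else 'S'
--         elif player_value == 18:
--             if dealer_value in [2, 3, 4, 5, 6]:
--                 return 'D'
--             elif dealer_value in [9, 10, 11]:
--                 return 'H'
--             else:
--                 return 'S'
--         elif player_value == 17:
--             return 'D' if dealer_value in [3, 4, 5, 6] else 'H'
--         elif player_value == 16 or player_value == 15: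
--             return 'D' if dealer_value in [4, 5, 6] else 'H'
--         elif player_value == 14 or player_value == 13:
--             return 'D' if dealer_value in [5, 6] else 'H'
--
--     # Determine action for hard totals
--     if player_value >= 17:
--         return 'S'
--     elif player_value >= 13:
--         return 'S' if dealer_value in [2, 3, 4, 5, 6] else 'H'
--     elif player_value == 12:
--         return 'S' if dealer_value in [4, 5, 6] else 'H'
--     elif player_value == 11:
--         return 'D'
--     elif player_value == 10:
--         return 'D' if dealer_value in [2, 3, 4, 5, 6, 7, 8, 9] else 'H'
--     elif player_value == 9:
--         return 'D' if dealer_value in [3, 4, 5, 6] else 'H'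
--     else:
--         return 'H'
-- ===== SOURCE B (Python) =====
-- # Table-driven rewrite: the branch cascade of A is replaced by lookup tables
-- # (pair table, soft-total table, hard-total range table) consulted in turn.
--
-- _FACE = {'Jack': 10, 'Queen': 10, 'King': 10, 'Ace': 11}
--
-- def calculate_hand_value(hand):
--     value = sum(_FACE.get(card, 0) or int(card) for card, suit in hand)
--     aces = sum(1 for card, suit in hand if card == 'Ace')
--     # closed form of "while value > 21 and aces: value -= 10; aces -= 1"
--     return value - 10 * min(aces, max(0, (value - 12) // 10))
--
-- _PAIR_TABLE = {
--     'Ace': (None, 'Y', 'Y'),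
--     '10': (None, 'N', 'N'),
--     '9': (frozenset({2, 3, 4, 5, 6, 8, 9}), 'Y', 'N'),
--     '8': (None, 'Y', 'Y'),
--     '7': (frozenset({2, 3, 4, 5, 6, 7}), 'Y', 'H'),
--     '6': (frozenset({2, 3, 4, 5, 6}), 'Y', 'H'),
--     '5': (frozenset({2, 3, 4, 5, 6, 7, 8, 9}), 'D', 'H'),
--     '4': (frozenset({5, 6}), 'Y', 'H'),
--     '3': (frozenset({2, 3, 4, 5, 6, 7}), 'Y', 'H'),
--     '2': (frozenset({2, 3, 4, 5, 6, 7}), 'Y', 'H'),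
-- }
--
-- _SOFT_TABLE = {
--     20: ([], 'S'),
--     19: ([(frozenset({6}), 'D')], 'S'),
--     18: ([(frozenset({2, 3, 4, 5, 6}), 'D'), (frozenset({9, 10, 11}), 'H')], 'S'),
--     17: ([(frozenset({3, 4, 5, 6}), 'D')], 'H'),
--     16: ([(frozenset({4, 5, 6}), 'D')], 'H'),
--     15: ([(frozenset({4, 5, 6}), 'D')], 'H'),
--     14: ([(frozenset({5, 6}), 'D')], 'H'),
--     13: ([(frozenset({5, 6}), 'D')], 'H'),
-- }
--
-- # (lo, hi-or-None, dealer set-or-None, action if in set, action otherwise)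
-- _HARD_TABLE = [
--     (17, None, None, 'S', 'S'),
--     (13, 16, frozenset({2, 3, 4, 5, 6}), 'S', 'H'),
--     (12, 12, frozenset({4, 5, 6}), 'S', 'H'),
--     (11, 11, None, 'D', 'D'),
--     (10, 10, frozenset({2, 3, 4, 5, 6, 7, 8, 9}), 'D', 'H'),
--     (9, 9, frozenset({3, 4, 5, 6}), 'D', 'H'),
-- ]
--
-- def _pair_rank(hand):
--     if len(hand) == 2 and hand[0][0] == hand[1][0]:
--         return hand[0][0]
--     return None
--
-- def get_strategy_action(player_hand, dealer_upcard):
--     player_value = calculate_hand_value(player_hand)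
--     dealer_value = calculate_hand_value([dealer_upcard])
--
--     rank = _pair_rank(player_hand)
--     if rank is not None:
--         entry = _PAIR_TABLE.get(rank)
--         if entry is not None:
--             dset, a_in, a_out = entry
--             return a_in if dset is None or dealer_value in dset else a_out
--
--     if any(card == 'Ace' for card, suit in player_hand):
--         entry = _SOFT_TABLE.get(player_value)
--         if entry is not None:
--             rules, default = entry
--             for dset, act in rules:
--                 if dealer_value in dset:
--                     return act
--             return default
--
--     for lo, hi, dset, a_in, a_out in _HARD_TABLE:
--         if player_value >= lo and (hi is None or player_value <= hi):
--             return a_in if dset is None or dealer_value in dset else a_out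
--     return 'H'
-- ===== Notes on version B (the rewrite author's own statement) =====
-- stated objective: simpler
-- what changed: The branch cascade is replaced by data: a pair-rank dict, a soft-total dict of (dealer-set, action) rules, and a hard-total range table scanned once, with fall-through exactly where A's cascade falls through; hand value uses a face-value dict plus a closed-form ace adjustment instead of the while loop.
import Mathlib
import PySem

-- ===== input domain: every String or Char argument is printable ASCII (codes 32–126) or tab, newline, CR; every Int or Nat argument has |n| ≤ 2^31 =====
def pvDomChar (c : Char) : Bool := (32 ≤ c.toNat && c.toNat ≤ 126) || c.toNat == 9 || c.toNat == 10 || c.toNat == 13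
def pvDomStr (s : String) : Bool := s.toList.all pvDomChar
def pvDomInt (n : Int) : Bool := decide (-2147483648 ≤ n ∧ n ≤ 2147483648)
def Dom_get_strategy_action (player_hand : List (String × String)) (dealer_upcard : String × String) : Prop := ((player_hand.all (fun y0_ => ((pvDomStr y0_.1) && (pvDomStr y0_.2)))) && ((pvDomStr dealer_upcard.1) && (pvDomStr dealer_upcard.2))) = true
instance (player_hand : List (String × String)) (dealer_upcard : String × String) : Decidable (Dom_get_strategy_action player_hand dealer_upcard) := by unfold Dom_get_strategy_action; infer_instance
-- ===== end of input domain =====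

-- B replaces A's branch cascade by lookup tables (pair / soft-total / hard-total range);
-- objective: simpler, data-driven code. Return values agree on all inputs where A returns
-- (Pre_ excludes hands whose rank string makes int(card) raise ValueError in both programs).

-- ===== PORT A =====
-- while value > 21 and ace_count: value -= 10; ace_count -= 1
def pvAdjustA (value : Int) : Nat → Int
  | 0 => value
  | n + 1 => if value > 21 then pvAdjustA (value - 10) n else value

-- calculate_hand_value; (PySem.Int.ofStr? card).getD 0 stands for int(card), exact on Pre_
-- (Pre_ excludes the inputs where ofStr? is none, i.e. where Python raises ValueError).
def pvCalcA (hand : List (String × String)) : Int :=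
  let st := hand.foldl (fun (st : Int × Nat) cs =>
    if cs.1 ∈ ["Jack", "Queen", "King"] then (st.1 + 10, st.2)
    else if cs.1 = "Ace" then (st.1 + 11, st.2 + 1)
    else (st.1 + (PySem.Int.ofStr? cs.1).getD 0, st.2)) (0, 0)
  pvAdjustA st.1 st.2

def get_strategy_action (player_hand : List (String × String)) (dealer_upcard : String × String) : String :=
  let player_value := pvCalcA player_hand
  let dealer_value := pvCalcA [dealer_upcard]
  -- len(player_hand) == 2 and player_hand[0][0] == player_hand[1][0] (indices safe under the length test)
  let pairBranch : Option String :=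
    match player_hand with
    | [c1, c2] =>
      if c1.1 = c2.1 then
        let pair := c1.1
        if pair = "Ace" then some "Y"
        else if pair = "10" then some "N"
        else if pair = "9" then some (if dealer_value ∈ ([2,3,4,5,6,8,9] : List Int) then "Y" else "N")
        else if pair = "8" then some "Y"
        else if pair = "7" then some (if dealer_value ∈ ([2,3,4,5,6,7] : List Int) then "Y" else "H")
        else if pair = "6" then some (if dealer_value ∈ ([2,3,4,5,6] : List Int) then "Y" else "H")
        else if pair = "5" then some (if dealer_value ∈ ([2,3,4,5,6,7,8,9] : List Int) then "D" else "H")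
        else if pair = "4" then some (if dealer_value ∈ ([5,6] : List Int) then "Y" else "H")
        else if pair = "3" ∨ pair = "2" then some (if dealer_value ∈ ([2,3,4,5,6,7] : List Int) then "Y" else "H")
        else none
      else none
    | _ => none
  match pairBranch with
  | some a => a
  | none =>
    let softBranch : Option String :=
      if player_hand.any (fun cs => cs.1 == "Ace") then
        if player_value = 20 then some "S"
        else if player_value = 19 then some (if dealer_value = 6 then "D" else "S")
        else if player_value = 18 then
          some (if dealer_value ∈ ([2,3,4,5,6] : List Int) then "D"
                else if dealer_value ∈ ([9,10,11] : List Int) then "H" else "S")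
        else if player_value = 17 then some (if dealer_value ∈ ([3,4,5,6] : List Int) then "D" else "H")
        else if player_value = 16 ∨ player_value = 15 then some (if dealer_value ∈ ([4,5,6] : List Int) then "D" else "H")
        else if player_value = 14 ∨ player_value = 13 then some (if dealer_value ∈ ([5,6] : List Int) then "D" else "H")
        else none
      else none
    match softBranch with
    | some a => a
    | none =>
      if player_value ≥ 17 then "S"
      else if player_value ≥ 13 then (if dealer_value ∈ ([2,3,4,5,6] : List Int) then "S" else "H")
      else if player_value = 12 then (if dealer_value ∈ ([4,5,6] : List Int) then "S" else "H")
      else if player_value = 11 then "D"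
      else if player_value = 10 then (if dealer_value ∈ ([2,3,4,5,6,7,8,9] : List Int) then "D" else "H")
      else if player_value = 9 then (if dealer_value ∈ ([3,4,5,6] : List Int) then "D" else "H")
      else "H"

-- ===== PORT B =====
def pvFace : PySem.Dict String Int :=
  PySem.Dict.mk [("Jack", 10), ("Queen", 10), ("King", 10), ("Ace", 11)]

-- _FACE.get(card, 0) or int(card)  (Python `or`: left operand unless it is 0)
def pvCardValB (card : String) : Int :=
  let f := pvFace.getD card 0
  if f ≠ 0 then f else (PySem.Int.ofStr? card).getD 0

def pvCalcB (hand : List (String × String)) : Int :=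
  let value := (hand.map (fun cs => pvCardValB cs.1)).sum
  let aces := hand.countP (fun cs => cs.1 == "Ace")
  value - 10 * min (aces : Int) (max 0 (PySem.Int.floordiv (value - 12) 10))

def pvPairTable : PySem.Dict String (Option (PySem.Set Int) × String × String) :=
  PySem.Dict.mk
    [("Ace", (none, "Y", "Y")),
     ("10", (none, "N", "N")),
     ("9", (some (PySem.Set.ofList [2,3,4,5,6,8,9]), "Y", "N")),
     ("8", (none, "Y", "Y")),
     ("7", (some (PySem.Set.ofList [2,3,4,5,6,7]), "Y", "H")),
     ("6", (some (PySem.Set.ofList [2,3,4,5,6]), "Y", "H")),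
     ("5", (some (PySem.Set.ofList [2,3,4,5,6,7,8,9]), "D", "H")),
     ("4", (some (PySem.Set.ofList [5,6]), "Y", "H")),
     ("3", (some (PySem.Set.ofList [2,3,4,5,6,7]), "Y", "H")),
     ("2", (some (PySem.Set.ofList [2,3,4,5,6,7]), "Y", "H"))]

def pvSoftTable : PySem.Dict Int (List (PySem.Set Int × String) × String) :=
  PySem.Dict.mk
    [(20, ([], "S")),
     (19, ([(PySem.Set.ofList [6], "D")], "S")),
     (18, ([(PySem.Set.ofList [2,3,4,5,6], "D"), (PySem.Set.ofList [9,10,11], "H")], "S")),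
     (17, ([(PySem.Set.ofList [3,4,5,6], "D")], "H")),
     (16, ([(PySem.Set.ofList [4,5,6], "D")], "H")),
     (15, ([(PySem.Set.ofList [4,5,6], "D")], "H")),
     (14, ([(PySem.Set.ofList [5,6], "D")], "H")),
     (13, ([(PySem.Set.ofList [5,6], "D")], "H"))]

def pvHardTable : List (Int × Option Int × Option (PySem.Set Int) × String × String) :=
  [(17, none, none, "S", "S"),
   (13, some 16, some (PySem.Set.ofList [2,3,4,5,6]), "S", "H"),
   (12, some 12, some (PySem.Set.ofList [4,5,6]), "S", "H"),
   (11, some 11, none, "D", "D"),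
   (10, some 10, some (PySem.Set.ofList [2,3,4,5,6,7,8,9]), "D", "H"),
   (9, some 9, some (PySem.Set.ofList [3,4,5,6]), "D", "H")]

-- `return act if dset is None or dv in dset else a_out`
def pvPick (dv : Int) (dset : Option (PySem.Set Int)) (aIn aOut : String) : String :=
  match dset with
  | none => aIn
  | some s => if dv ∈ s then aIn else aOut

def pvSoftRules (dv : Int) : List (PySem.Set Int × String) → String → String
  | [], dflt => dflt
  | (s, act) :: rest, dflt => if dv ∈ s then act else pvSoftRules dv rest dflt

-- `hi is None or player_value <= hi`
def pvLeOpt (pv : Int) : Option Int → Bool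
  | none => true
  | some h => pv ≤ h

def pvHardScan (pv dv : Int) : List (Int × Option Int × Option (PySem.Set Int) × String × String) → String
  | [] => "H"
  | (lo, hi, dset, aIn, aOut) :: rest =>
    if pv ≥ lo ∧ pvLeOpt pv hi then pvPick dv dset aIn aOut
    else pvHardScan pv dv rest

-- _pair_rank: the rank if the hand is a same-rank pair, else None
-- (indices 0 and 1 are guarded by the length test, so pyGetD's default is never used)
def pvPairKey (hand : List (String × String)) : Option String :=
  if hand.length = 2 ∧ (PySem.List.pyGetD hand 0 ("", "")).1 = (PySem.List.pyGetD hand 1 ("", "")).1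
  then some (PySem.List.pyGetD hand 0 ("", "")).1
  else none

def get_strategy_action_alt (player_hand : List (String × String)) (dealer_upcard : String × String) : String :=
  let player_value := pvCalcB player_hand
  let dealer_value := pvCalcB [dealer_upcard]
  let pairAns : Option String :=
    (pvPairKey player_hand).bind (fun r =>
      (pvPairTable.get? r).map (fun e => pvPick dealer_value e.1 e.2.1 e.2.2))
  let softAns : Option String :=
    if player_hand.any (fun cs => cs.1 == "Ace") then
      (pvSoftTable.get? player_value).map (fun e => pvSoftRules dealer_value e.1 e.2)
    else none
  pairAns.getD (softAns.getD (pvHardScan player_value dealer_value pvHardTable))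

-- ===== PRECONDITION & SPEC =====
-- A (and B) raise ValueError via int(card) on any rank string that is neither a face-card
-- name nor a Python integer literal; Pre_ excludes exactly those inputs.
def pvRankOk (c : String) : Prop :=
  c ∈ ["Jack", "Queen", "King", "Ace"] ∨ (PySem.Int.ofStr? c).isSome = true

def Pre_get_strategy_action (player_hand : List (String × String)) (dealer_upcard : String × String) : Prop :=
  (∀ cs ∈ player_hand, pvRankOk cs.1) ∧ pvRankOk dealer_upcard.1

instance (player_hand : List (String × String)) (dealer_upcard : String × String) : Decidable (Pre_get_strategy_action player_hand dealer_upcard) := by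
  unfold Pre_get_strategy_action pvRankOk; infer_instance

def pvWitness_get_strategy_action : (List (String × String)) × (String × String) :=
  ([("Ace", "Spades"), ("7", "Hearts")], ("10", "Clubs"))

def Spec_get_strategy_action (player_hand : List (String × String)) (dealer_upcard : String × String) (out : String) : Prop := out = get_strategy_action_alt player_hand dealer_upcard
instance (player_hand : List (String × String)) (dealer_upcard : String × String) (out : String) : Decidable (Spec_get_strategy_action player_hand dealer_upcard out) := by unfold Spec_get_strategy_action; infer_instance

-- ===== CLAIM (what is proved, stated in full; the proofs are below) =====
def Claim_equal_get_strategy_action : Prop := ∀ (player_hand : List (String × String)) (dealer_upcard : String × String), Dom_get_strategy_action player_hand dealer_upcard → Pre_get_strategy_action player_hand dealer_upcard → Spec_get_strategy_action player_hand dealer_upcard (get_strategy_action player_hand dealer_upcard)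

-- ===== LEMMAS AND PROOFS =====
-- closed form of A's ace-adjustment loop
theorem pvAdjust_closed (a : Nat) (v : Int) :
    pvAdjustA v a = v - 10 * min (a : Int) (max 0 (PySem.Int.floordiv (v - 12) 10)) := by
  induction a generalizing v with
  | zero =>
    rw [pvAdjustA, PySem.Int.floordiv_eq_ediv_of_pos (by norm_num)]
    omega
  | succ n ih =>
    rw [pvAdjustA]
    split_ifs with h
    · rw [ih, PySem.Int.floordiv_eq_ediv_of_pos (by norm_num),
        PySem.Int.floordiv_eq_ediv_of_pos (by norm_num)]
      push_cast
      omega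
    · rw [PySem.Int.floordiv_eq_ediv_of_pos (by norm_num)]
      push_cast
      omega

-- A's single (value, aces) fold = B's two separate passes
theorem pvFold_eq (hand : List (String × String)) (v : Int) (a : Nat) :
    hand.foldl (fun (st : Int × Nat) cs =>
      if cs.1 ∈ ["Jack", "Queen", "King"] then (st.1 + 10, st.2)
      else if cs.1 = "Ace" then (st.1 + 11, st.2 + 1)
      else (st.1 + (PySem.Int.ofStr? cs.1).getD 0, st.2)) (v, a)
    = (v + (hand.map (fun cs => pvCardValB cs.1)).sum,
       a + hand.countP (fun cs => cs.1 == "Ace")) := by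
  induction hand generalizing v a with
  | nil => simp
  | cons c t ih =>
    rw [List.foldl_cons, List.map_cons, List.sum_cons, List.countP_cons]
    by_cases h1 : c.1 ∈ ["Jack", "Queen", "King"]
    · have hv : pvCardValB c.1 = 10 := by
        simp only [List.mem_cons, List.not_mem_nil, or_false] at h1
        rcases h1 with h | h | h <;> rw [h] <;> rfl
      have hna : (c.1 == "Ace") = false := by
        simp only [List.mem_cons, List.not_mem_nil, or_false] at h1
        rcases h1 with h | h | h <;> rw [h] <;> rfl
      rw [if_pos h1, ih, hv, hna]
      simp only [Prod.mk.injEq, Bool.false_eq_true, if_false]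
      constructor <;> [ring; omega]
    · by_cases h2 : c.1 = "Ace"
      · have hv : pvCardValB c.1 = 11 := by rw [h2]; rfl
        have hna : (c.1 == "Ace") = true := by simp [h2]
        rw [if_neg h1, if_pos h2, ih, hv, hna]
        simp only [Prod.mk.injEq, if_true]
        constructor <;> [ring; omega]
      · simp only [List.mem_cons, List.not_mem_nil, or_false, not_or] at h1
        obtain ⟨hj, hq, hk⟩ := h1
        have bj : ("Jack" == c.1) = false := by simp [Ne.symm hj]
        have bq : ("Queen" == c.1) = false := by simp [Ne.symm hq]
        have bk : ("King" == c.1) = false := by simp [Ne.symm hk]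
        have ba : ("Ace" == c.1) = false := by simp [Ne.symm h2]
        have hv : pvCardValB c.1 = (PySem.Int.ofStr? c.1).getD 0 := by
          simp [pvCardValB, pvFace, PySem.Dict.getD, PySem.Dict.get?, List.find?, bj, bq, bk, ba]
        have hna : (c.1 == "Ace") = false := by simp [h2]
        rw [if_neg (by simp [hj, hq, hk]), if_neg h2, ih, hv, hna]
        simp only [Prod.mk.injEq, Bool.false_eq_true, if_false]
        constructor <;> [ring; omega]

theorem pvCalc_eq (hand : List (String × String)) : pvCalcA hand = pvCalcB hand := by
  simp only [pvCalcA, pvCalcB, pvFold_eq, pvAdjust_closed]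
  norm_num

-- a guarded branch equals the guarded key fed through bind
theorem pvIfBind (c : Prop) [Decidable c] (X : Option String) (k : String)
    (f : String → Option String) (h : X = f k) :
    (if c then X else none) = (if c then some k else none).bind f := by
  split_ifs <;> simp [h]

-- A's pair branch chain = B's pair-table lookup
theorem pvPair_eq (pair : String) (dv : Int) :
    (if pair = "Ace" then some "Y"
     else if pair = "10" then some "N"
     else if pair = "9" then some (if dv ∈ ([2,3,4,5,6,8,9] : List Int) then "Y" else "N")
     else if pair = "8" then some "Y"
     else if pair = "7" then some (if dv ∈ ([2,3,4,5,6,7] : List Int) then "Y" else "H")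
     else if pair = "6" then some (if dv ∈ ([2,3,4,5,6] : List Int) then "Y" else "H")
     else if pair = "5" then some (if dv ∈ ([2,3,4,5,6,7,8,9] : List Int) then "D" else "H")
     else if pair = "4" then some (if dv ∈ ([5,6] : List Int) then "Y" else "H")
     else if pair = "3" ∨ pair = "2" then some (if dv ∈ ([2,3,4,5,6,7] : List Int) then "Y" else "H")
     else (none : Option String))
  = (pvPairTable.get? pair).map (fun e => pvPick dv e.1 e.2.1 e.2.2) := by
  by_cases hA : pair = "Ace"
  · subst hA; simp [pvPairTable, PySem.Dict.get?, pvPick]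
  by_cases hT : pair = "10"
  · subst hT; simp [pvPairTable, PySem.Dict.get?, pvPick]
  by_cases h9 : pair = "9"
  · subst h9; simp [pvPairTable, PySem.Dict.get?, pvPick, PySem.Set.mem_ofList]
  by_cases h8 : pair = "8"
  · subst h8; simp [pvPairTable, PySem.Dict.get?, pvPick]
  by_cases h7 : pair = "7"
  · subst h7; simp [pvPairTable, PySem.Dict.get?, pvPick, PySem.Set.mem_ofList]
  by_cases h6 : pair = "6"
  · subst h6; simp [pvPairTable, PySem.Dict.get?, pvPick, PySem.Set.mem_ofList]
  by_cases h5 : pair = "5"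
  · subst h5; simp [pvPairTable, PySem.Dict.get?, pvPick, PySem.Set.mem_ofList]
  by_cases h4 : pair = "4"
  · subst h4; simp [pvPairTable, PySem.Dict.get?, pvPick, PySem.Set.mem_ofList]
  by_cases h3 : pair = "3"
  · subst h3; simp [pvPairTable, PySem.Dict.get?, pvPick, PySem.Set.mem_ofList]
  by_cases h2 : pair = "2"
  · subst h2; simp [pvPairTable, PySem.Dict.get?, pvPick, PySem.Set.mem_ofList]
  · have bA : ("Ace" == pair) = false := by simp [Ne.symm hA]
    have bT : ("10" == pair) = false := by simp [Ne.symm hT]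
    have b9 : ("9" == pair) = false := by simp [Ne.symm h9]
    have b8 : ("8" == pair) = false := by simp [Ne.symm h8]
    have b7 : ("7" == pair) = false := by simp [Ne.symm h7]
    have b6 : ("6" == pair) = false := by simp [Ne.symm h6]
    have b5 : ("5" == pair) = false := by simp [Ne.symm h5]
    have b4 : ("4" == pair) = false := by simp [Ne.symm h4]
    have b3 : ("3" == pair) = false := by simp [Ne.symm h3]
    have b2 : ("2" == pair) = false := by simp [Ne.symm h2]
    simp [pvPairTable, PySem.Dict.get?, List.find?, hA, hT, h9, h8, h7, h6, h5, h4, h3, h2,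
      bA, bT, b9, b8, b7, b6, b5, b4, b3, b2]

-- A's soft-total chain = B's soft-table lookup
theorem pvSoft_eq (pv dv : Int) :
    (if pv = 20 then some "S"
     else if pv = 19 then some (if dv = 6 then "D" else "S")
     else if pv = 18 then
       some (if dv ∈ ([2,3,4,5,6] : List Int) then "D"
             else if dv ∈ ([9,10,11] : List Int) then "H" else "S")
     else if pv = 17 then some (if dv ∈ ([3,4,5,6] : List Int) then "D" else "H")
     else if pv = 16 ∨ pv = 15 then some (if dv ∈ ([4,5,6] : List Int) then "D" else "H")
     else if pv = 14 ∨ pv = 13 then some (if dv ∈ ([5,6] : List Int) then "D" else "H")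
     else (none : Option String))
  = (pvSoftTable.get? pv).map (fun e => pvSoftRules dv e.1 e.2) := by
  by_cases h20 : pv = 20
  · subst h20; simp [pvSoftTable, PySem.Dict.get?, pvSoftRules]
  by_cases h19 : pv = 19
  · subst h19; simp [pvSoftTable, PySem.Dict.get?, pvSoftRules, PySem.Set.mem_ofList]
  by_cases h18 : pv = 18
  · subst h18; simp [pvSoftTable, PySem.Dict.get?, pvSoftRules, PySem.Set.mem_ofList]
  by_cases h17 : pv = 17
  · subst h17; simp [pvSoftTable, PySem.Dict.get?, pvSoftRules, PySem.Set.mem_ofList]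
  by_cases h16 : pv = 16
  · subst h16; simp [pvSoftTable, PySem.Dict.get?, pvSoftRules, PySem.Set.mem_ofList]
  by_cases h15 : pv = 15
  · subst h15; simp [pvSoftTable, PySem.Dict.get?, pvSoftRules, PySem.Set.mem_ofList]
  by_cases h14 : pv = 14
  · subst h14; simp [pvSoftTable, PySem.Dict.get?, pvSoftRules, PySem.Set.mem_ofList]
  by_cases h13 : pv = 13
  · subst h13; simp [pvSoftTable, PySem.Dict.get?, pvSoftRules, PySem.Set.mem_ofList]
  · have b20 : ((20 : Int) == pv) = false := by simp [Ne.symm h20]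
    have b19 : ((19 : Int) == pv) = false := by simp [Ne.symm h19]
    have b18 : ((18 : Int) == pv) = false := by simp [Ne.symm h18]
    have b17 : ((17 : Int) == pv) = false := by simp [Ne.symm h17]
    have b16 : ((16 : Int) == pv) = false := by simp [Ne.symm h16]
    have b15 : ((15 : Int) == pv) = false := by simp [Ne.symm h15]
    have b14 : ((14 : Int) == pv) = false := by simp [Ne.symm h14]
    have b13 : ((13 : Int) == pv) = false := by simp [Ne.symm h13]
    simp [pvSoftTable, PySem.Dict.get?, List.find?, h20, h19, h18, h17, h16, h15, h14, h13,
      b20, b19, b18, b17, b16, b15, b14, b13]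

-- A's hard-total chain = B's range-table scan
theorem pvHard_eq (pv dv : Int) :
    (if pv ≥ 17 then "S"
     else if pv ≥ 13 then (if dv ∈ ([2,3,4,5,6] : List Int) then "S" else "H")
     else if pv = 12 then (if dv ∈ ([4,5,6] : List Int) then "S" else "H")
     else if pv = 11 then "D"
     else if pv = 10 then (if dv ∈ ([2,3,4,5,6,7,8,9] : List Int) then "D" else "H")
     else if pv = 9 then (if dv ∈ ([3,4,5,6] : List Int) then "D" else "H")
     else "H")
  = pvHardScan pv dv pvHardTable := by
  simp only [pvHardScan, pvHardTable, pvPick, pvLeOpt, PySem.Set.mem_ofList,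
    decide_eq_true_eq, and_true]
  split_ifs <;> first | rfl | omega

theorem get_strategy_action_spec' (player_hand : List (String × String)) (dealer_upcard : String × String) :
    get_strategy_action player_hand dealer_upcard = get_strategy_action_alt player_hand dealer_upcard := by
  simp only [get_strategy_action, get_strategy_action_alt, pvCalc_eq]
  generalize pvCalcB player_hand = pv
  generalize pvCalcB [dealer_upcard] = dv
  have hpairB :
      (match player_hand with
       | [c1, c2] =>
         if c1.1 = c2.1 then
           (if c1.1 = "Ace" then some "Y"
            else if c1.1 = "10" then some "N"
            else if c1.1 = "9" then some (if dv ∈ ([2,3,4,5,6,8,9] : List Int) then "Y" else "N")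
            else if c1.1 = "8" then some "Y"
            else if c1.1 = "7" then some (if dv ∈ ([2,3,4,5,6,7] : List Int) then "Y" else "H")
            else if c1.1 = "6" then some (if dv ∈ ([2,3,4,5,6] : List Int) then "Y" else "H")
            else if c1.1 = "5" then some (if dv ∈ ([2,3,4,5,6,7,8,9] : List Int) then "D" else "H")
            else if c1.1 = "4" then some (if dv ∈ ([5,6] : List Int) then "Y" else "H")
            else if c1.1 = "3" ∨ c1.1 = "2" then some (if dv ∈ ([2,3,4,5,6,7] : List Int) then "Y" else "H")
            else none)
         else none
       | _ => none)
    = (pvPairKey player_hand).bind (fun r =>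
        (pvPairTable.get? r).map (fun e => pvPick dv e.1 e.2.1 e.2.2)) := by
    rcases player_hand with _ | ⟨c1, _ | ⟨c2, _ | ⟨c3, t⟩⟩⟩
    · simp [pvPairKey]
    · simp [pvPairKey]
    · have hk : pvPairKey [c1, c2] = if c1.1 = c2.1 then some c1.1 else none := by
        simp [pvPairKey, PySem.List.pyGetD]
      rw [hk]
      exact pvIfBind (c1.1 = c2.1) _ c1.1 _ (pvPair_eq c1.1 dv)
    · simp [pvPairKey]
  rw [hpairB]
  cases (pvPairKey player_hand).bind
      (fun r => (pvPairTable.get? r).map (fun e => pvPick dv e.1 e.2.1 e.2.2)) with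
  | some a => rfl
  | none =>
    have hsoftB := if_congr (P := (player_hand.any fun cs => cs.1 == "Ace") = true)
      (Q := (player_hand.any fun cs => cs.1 == "Ace") = true) Iff.rfl (pvSoft_eq pv dv)
      (rfl : (none : Option String) = none)
    rw [hsoftB]
    cases (if (player_hand.any fun cs => cs.1 == "Ace") = true then
        (pvSoftTable.get? pv).map (fun e => pvSoftRules dv e.1 e.2)
      else none) with
    | some a => rfl
    | none => exact pvHard_eq pv dv

theorem get_strategy_action_spec : Claim_equal_get_strategy_action := by
  intro ph up _ _
  exact get_strategy_action_spec' ph up
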